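-- pv_equiv track=rewrite | github.com/limuhit/360-Image-Compression | new_file.py | find_anchor_setup
-- ===== SOURCE A (Python) =====
-- def find_anchor_setup(flist):
--     idx = 0
--     cuda_flag = False
--     while idx < len(flist):
--         if flist[idx].find('CUDAExtension(')>=0:
--             cuda_flag = True
--         if cuda_flag and flist[idx].find(']')>=0:
--             return idx
--         idx+=1
--     return -1
-- ===== SOURCE B (Python) =====
-- def find_anchor_setup(flist):
--     # One backward pass (DP over suffixes): ans_true = answer for the suffix
--     # assuming 'CUDAExtension(' was already seen; ans = full answer for the suffix.
--     ans_true = -1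
--     ans = -1
--     for idx in range(len(flist) - 1, -1, -1):
--         line = flist[idx]
--         has_m = 'CUDAExtension(' in line
--         has_b = ']' in line
--         if has_m:
--             ans = idx if has_b else ans_true
--         if has_b:
--             ans_true = idx
--     return ans
-- ===== Notes on version B (the rewrite author's own statement) =====
-- stated objective: alternative
-- what changed: Replaces A's forward while-loop carrying a boolean flag by a single backward pass computing two suffix answers (the answer assuming the marker was already seen, and the full answer) as a right-to-left dynamic program.
import Mathlib
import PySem

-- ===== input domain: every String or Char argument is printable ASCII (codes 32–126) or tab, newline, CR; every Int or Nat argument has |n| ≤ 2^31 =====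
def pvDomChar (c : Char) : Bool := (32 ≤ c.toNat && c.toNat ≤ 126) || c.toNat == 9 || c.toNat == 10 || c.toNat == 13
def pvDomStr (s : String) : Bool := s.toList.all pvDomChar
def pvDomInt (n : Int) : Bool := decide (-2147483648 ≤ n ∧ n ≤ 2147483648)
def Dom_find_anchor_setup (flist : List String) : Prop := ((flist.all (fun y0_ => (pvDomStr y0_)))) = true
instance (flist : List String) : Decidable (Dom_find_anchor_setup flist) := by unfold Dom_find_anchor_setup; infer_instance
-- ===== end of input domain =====

-- B replaces A's forward flag-carrying while-loop by ONE backward pass computing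
-- two suffix answers (answer-if-marker-already-seen, full answer); objective: alternative.

-- ===== PORT A =====
-- A's while-loop: index counter and cuda_flag carried through a structural recursion.
def pvLoopA : List String → Int → Bool → Int
  | [], _, _ => -1
  | l :: rest, idx, flag =>
    let flag' := if 0 ≤ PySem.Str.find l "CUDAExtension(" then true else flag
    if flag' = true ∧ 0 ≤ PySem.Str.find l "]" then idx else pvLoopA rest (idx + 1) flag'

def find_anchor_setup (flist : List String) : Int := pvLoopA flist 0 false

-- ===== PORT B =====
-- B's backward pass: each step combines line idx with the pair (ans_true, ans)
-- already computed for the suffix idx+1 (right-to-left DP, as Source B's reversed loop).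
def pvBack : List String → Int → Int × Int
  | [], _ => (-1, -1)
  | l :: rest, idx =>
    let p := pvBack rest (idx + 1)
    let hasM := PySem.Str.isIn "CUDAExtension(" l
    let hasB := PySem.Str.isIn "]" l
    let ans := if hasM then (if hasB then idx else p.1) else p.2
    let ansTrue := if hasB then idx else p.1
    (ansTrue, ans)

def find_anchor_setup_alt (flist : List String) : Int := (pvBack flist 0).2

-- ===== PRECONDITION & SPEC =====
def Spec_find_anchor_setup (flist : List String) (out : Int) : Prop := out = find_anchor_setup_alt flist
instance (flist : List String) (out : Int) : Decidable (Spec_find_anchor_setup flist out) := by unfold Spec_find_anchor_setup; infer_instance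

-- ===== CLAIM (what is proved, stated in full; the proofs are below) =====
def Claim_equal_find_anchor_setup : Prop := ∀ (flist : List String), Dom_find_anchor_setup flist → Spec_find_anchor_setup flist (find_anchor_setup flist)

-- ===== LEMMAS AND PROOFS =====

-- 'sub in l' and 'l.find(sub) >= 0' are the same test
theorem pv_isIn_iff_find_nonneg (sub l : String) :
    PySem.Str.isIn sub l = true ↔ 0 ≤ PySem.Str.find l sub := by
  rw [PySem.Str.isIn_iff_infix, PySem.Str.find_nonneg_iff]

-- A's loop, in both flag states, equals the two components of B's backward pass
theorem pvLoopA_eq_pvBack (xs : List String) (i : Int) :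
    pvLoopA xs i true = (pvBack xs i).1 ∧ pvLoopA xs i false = (pvBack xs i).2 := by
  induction xs generalizing i with
  | nil => exact ⟨rfl, rfl⟩
  | cons l rest ih =>
    obtain ⟨iht, ihf⟩ := ih (i + 1)
    by_cases hb : 0 ≤ PySem.Str.find l "]" <;>
    by_cases hm : 0 ≤ PySem.Str.find l "CUDAExtension("
    · have hb' : PySem.Str.isIn "]" l = true := (pv_isIn_iff_find_nonneg _ _).mpr hb
      have hm' : PySem.Str.isIn "CUDAExtension(" l = true := (pv_isIn_iff_find_nonneg _ _).mpr hm
      refine ⟨?_, ?_⟩ <;>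
      · simp only [pvLoopA, pvBack, hb', hm', reduceIte]
        rw [if_pos hm, if_pos (⟨rfl, hb⟩ : true = true ∧ 0 ≤ PySem.Str.find l "]")]
    · have hb' : PySem.Str.isIn "]" l = true := (pv_isIn_iff_find_nonneg _ _).mpr hb
      have hm' : PySem.Str.isIn "CUDAExtension(" l = false :=
        Bool.eq_false_iff.mpr (fun hc => hm ((pv_isIn_iff_find_nonneg _ _).mp hc))
      refine ⟨?_, ?_⟩
      · simp only [pvLoopA, pvBack, hb', hm', reduceIte]
        rw [if_neg hm, if_pos (⟨rfl, hb⟩ : true = true ∧ 0 ≤ PySem.Str.find l "]")]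
      · simp only [pvLoopA, pvBack, hb', hm', reduceIte]
        rw [if_neg hm,
          if_neg (fun h : false = true ∧ 0 ≤ PySem.Str.find l "]" => Bool.false_ne_true h.1)]
        exact ihf
    · have hb' : PySem.Str.isIn "]" l = false :=
        Bool.eq_false_iff.mpr (fun hc => hb ((pv_isIn_iff_find_nonneg _ _).mp hc))
      have hm' : PySem.Str.isIn "CUDAExtension(" l = true := (pv_isIn_iff_find_nonneg _ _).mpr hm
      refine ⟨?_, ?_⟩ <;>
      · simp only [pvLoopA, pvBack, hb', hm', reduceIte]
        rw [if_pos hm,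
          if_neg (fun h : true = true ∧ 0 ≤ PySem.Str.find l "]" => hb h.2)]
        exact iht
    · have hb' : PySem.Str.isIn "]" l = false :=
        Bool.eq_false_iff.mpr (fun hc => hb ((pv_isIn_iff_find_nonneg _ _).mp hc))
      have hm' : PySem.Str.isIn "CUDAExtension(" l = false :=
        Bool.eq_false_iff.mpr (fun hc => hm ((pv_isIn_iff_find_nonneg _ _).mp hc))
      refine ⟨?_, ?_⟩
      · simp only [pvLoopA, pvBack, hb', hm']
        rw [if_neg hm,
          if_neg (fun h : true = true ∧ 0 ≤ PySem.Str.find l "]" => hb h.2)]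
        exact iht
      · simp only [pvLoopA, pvBack, hb', hm']
        rw [if_neg hm,
          if_neg (fun h : false = true ∧ 0 ≤ PySem.Str.find l "]" => Bool.false_ne_true h.1)]
        exact ihf

-- ===== VERDICT (by name: the statement is the Claim_ definition above) =====
theorem find_anchor_setup_spec : Claim_equal_find_anchor_setup := by
  intro flist _
  exact (pvLoopA_eq_pvBack flist 0).2
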